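-- pv_equiv track=rewrite | github.com/cuitengweii/GasGx-Video-Distribution | src/cybercar/common/telegram_api.py | _normalize_proxy_url
-- ===== SOURCE A (Python) =====
-- from typing import Any, Dict, Mapping
--
-- def _normalize_proxy_url(raw: Any) -> str:
--     token = str(raw or "").strip()
--     if not token:
--         return ""
--     if ";" in token and "=" in token:
--         entries: dict[str, str] = {}
--         for part in token.split(";"):
--             name, sep, value = part.partition("=")
--             if not sep:
--                 continue
--             key = str(name or "").strip().lower()
--             normalized = _normalize_proxy_url(value)
--             if normalized:
--                 entries[key] = normalized
--         for key in ("https", "http", "socks", "socks5"):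
--             if entries.get(key):
--                 return entries[key]
--         return ""
--     if "://" not in token:
--         return f"http://{token}"
--     return token
-- ===== SOURCE B (Python) =====
-- def _normalize_proxy_url(raw):
--     token = str(raw or "").strip()
--     if not token:
--         return ""
--     if ";" in token and "=" in token:
--         for scheme in ("https", "http", "socks", "socks5"):
--             best = ""
--             for part in token.split(";"):
--                 name, sep, value = part.partition("=")
--                 if not sep:
--                     continue
--                 if str(name or "").strip().lower() != scheme:
--                     continue
--                 v = value.strip()
--                 if v:
--                     best = v if "://" in v else f"http://{v}"
--             if best:
--                 return best
--         return ""
--     if "://" not in token: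
--         return f"http://{token}"
--     return token
-- ===== Notes on version B (the rewrite author's own statement) =====
-- stated objective: alternative
-- what changed: B drops A's recursion and intermediate entries dict: it loops over the preference order (https, http, socks, socks5) and for each scheme rescans the semicolon-separated parts, inlining the value normalization and keeping the last non-empty match, returning the first scheme that yields one.
import Mathlib
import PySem

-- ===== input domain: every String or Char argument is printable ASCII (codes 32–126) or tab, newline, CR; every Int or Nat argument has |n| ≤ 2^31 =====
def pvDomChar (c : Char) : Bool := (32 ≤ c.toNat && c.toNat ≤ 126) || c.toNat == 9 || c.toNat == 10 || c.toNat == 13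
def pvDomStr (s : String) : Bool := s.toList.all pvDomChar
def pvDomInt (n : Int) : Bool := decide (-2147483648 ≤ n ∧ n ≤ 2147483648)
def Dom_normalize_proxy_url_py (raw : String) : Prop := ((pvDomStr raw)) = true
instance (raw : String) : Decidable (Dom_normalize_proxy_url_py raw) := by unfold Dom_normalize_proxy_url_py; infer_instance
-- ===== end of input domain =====

-- B replaces A's recursive dict-building pass by an outer loop over the preference order
-- that rescans the semicolon-separated parts per scheme, keeping the last matching normalized value (no dict,
-- no recursion); same return value everywhere ('alternative' objective, not faster).

-- ===== PORT A =====
-- hand port of str.partition(sep) for a ONE-character separator (exact: splits at the FIRST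
-- occurrence; returns (s, "", "") when the separator is absent) — shared by both ports
def pyPartitionChar : List Char → Char → List Char × List Char × List Char
  | [], _ => ([], [], [])
  | x :: xs, c =>
    if x = c then ([], [c], xs)
    else
      let r := pyPartitionChar xs c
      (x :: r.1, r.2.1, r.2.2)

-- `for key in ("https","http","socks","socks5"): if entries.get(key): return entries[key]` / `return ""`
def pyPrefLoop (entries : PySem.Dict String String) : List String → String
  | [] => ""
  | k :: ks =>
    match entries.get? k with
    | some v => if v.toList = [] then pyPrefLoop entries ks else v
    | none => pyPrefLoop entries ks

-- A's recursion, with a fuel guard only to make the same computation total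
-- (fuel = |raw|+1 always suffices; the 0 case is never reached from normalize_proxy_url_py)
def pyNormGo : Nat → String → String
  | 0, _ => ""
  | n + 1, raw =>
    let token := PySem.Str.strip raw
    if token.toList = [] then ""
    else if PySem.Str.isIn ";" token && PySem.Str.isIn "=" token then
      let parts := (PySem.Str.split? token ";").getD []
      let entries := parts.foldl (fun (d : PySem.Dict String String) part =>
        let r := pyPartitionChar part.toList '='
        if r.2.1 = [] then d
        else
          let key := PySem.Str.lower (PySem.Str.strip (String.ofList r.1))
          let normalized := pyNormGo n (String.ofList r.2.2)
          if normalized.toList = [] then d else d.insert key normalized) PySem.Dict.empty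
      pyPrefLoop entries ["https", "http", "socks", "socks5"]
    else if PySem.Str.isIn "://" token = false then String.ofList ("http://".toList ++ token.toList)
    else token

def normalize_proxy_url_py (raw : String) : String := pyNormGo (raw.toList.length + 1) raw

-- ===== PORT B =====
-- B's inner loop: remember the LAST part whose key equals `scheme` and whose normalized value is non-empty
def altBest (parts : List String) (scheme : String) : String :=
  parts.foldl (fun best part =>
    let r := pyPartitionChar part.toList '='
    if r.2.1 = [] then best
    else if PySem.Str.lower (PySem.Str.strip (String.ofList r.1)) ≠ scheme then best
    else
      let v := PySem.Str.strip (String.ofList r.2.2)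
      if v.toList = [] then best
      else if PySem.Str.isIn "://" v then v
      else String.ofList ("http://".toList ++ v.toList)) ""

-- B's outer loop: first preference scheme with a non-empty best value
def altSchemes (parts : List String) : List String → String
  | [] => ""
  | s :: ss =>
    let best := altBest parts s
    if best.toList = [] then altSchemes parts ss else best

def normalize_proxy_url_py_alt (raw : String) : String :=
  let token := PySem.Str.strip raw
  if token.toList = [] then ""
  else if PySem.Str.isIn ";" token && PySem.Str.isIn "=" token then
    altSchemes ((PySem.Str.split? token ";").getD []) ["https", "http", "socks", "socks5"]
  else if PySem.Str.isIn "://" token = false then String.ofList ("http://".toList ++ token.toList)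
  else token

-- ===== PRECONDITION & SPEC =====
def Spec_normalize_proxy_url_py (raw : String) (out : String) : Prop := out = normalize_proxy_url_py_alt raw
instance (raw : String) (out : String) : Decidable (Spec_normalize_proxy_url_py raw out) := by unfold Spec_normalize_proxy_url_py; infer_instance

-- ===== CLAIM (what is proved, stated in full; the proofs are below) =====
def Claim_equal_normalize_proxy_url_py : Prop := ∀ (raw : String), Dom_normalize_proxy_url_py raw → Spec_normalize_proxy_url_py raw (normalize_proxy_url_py raw)

-- ===== LEMMAS AND PROOFS =====

-- the common normalization of one '='-value (what A's recursive call computes on it)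
def normVal (value : String) : String :=
  let v := PySem.Str.strip value
  if v.toList = [] then ""
  else if PySem.Str.isIn "://" v = false then String.ofList ("http://".toList ++ v.toList)
  else v

-- last qualifying normalized value for a given scheme, as one fold
def gStep (scheme : String) (acc : Option String) (part : String) : Option String :=
  let r := pyPartitionChar part.toList '='
  if r.2.1 = [] then acc
  else if PySem.Str.lower (PySem.Str.strip (String.ofList r.1)) ≠ scheme then acc
  else if (normVal (String.ofList r.2.2)).toList = [] then acc
  else some (normVal (String.ofList r.2.2))

def gLast (parts : List String) (scheme : String) : Option String :=
  parts.foldl (gStep scheme) none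

-- A's step with the recursive call replaced by normVal
def aStep (d : PySem.Dict String String) (part : String) : PySem.Dict String String :=
  let r := pyPartitionChar part.toList '='
  if r.2.1 = [] then d
  else
    let key := PySem.Str.lower (PySem.Str.strip (String.ofList r.1))
    let normalized := normVal (String.ofList r.2.2)
    if normalized.toList = [] then d else d.insert key normalized

theorem mem_of_mem_strip {c : Char} {s : List Char} (h : c ∈ PySem.Chars.strip s) : c ∈ s := by
  simp only [PySem.Chars.strip, PySem.Chars.rstrip, PySem.Chars.lstrip, List.mem_reverse] at h
  have h1 := (List.dropWhile_sublist (l := (List.dropWhile PySem.Chars.isspace s).reverse)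
    (p := PySem.Chars.isspace)).subset h
  rw [List.mem_reverse] at h1
  exact (List.dropWhile_sublist (l := s) (p := PySem.Chars.isspace)).subset h1

theorem isIn_singleton_false {c : Char} {s : List Char} (h : c ∉ s) :
    PySem.Chars.isIn [c] s = false := by
  rw [PySem.Chars.isIn_eq_false_iff]
  intro hinf
  exact h (List.singleton_sublist.mp hinf.sublist)

theorem splitOn_go_no_sep (c : Char) : ∀ (fuel : Nat) (l cur : List Char) (acc : List (List Char)),
    l.length < fuel → c ∉ cur → (∀ p ∈ acc, c ∉ p) →
    ∀ p ∈ PySem.Chars.splitOn.go [c] fuel l cur acc, c ∉ p := by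
  intro fuel
  induction fuel with
  | zero => intro l cur acc hl; omega
  | succ n ih =>
    intro l cur acc hl hcur hacc p hp
    match l, hl with
    | [], _ =>
      rw [PySem.Chars.splitOn.go.eq_def] at hp
      simp only [List.mem_reverse, List.mem_cons] at hp
      rcases hp with h1 | h2
      · subst h1; simpa using hcur
      · exact hacc p h2
    | ch :: rest, hl =>
      rw [PySem.Chars.splitOn.go.eq_def] at hp
      simp only at hp
      by_cases hpre : [c].isPrefixOf (ch :: rest) = true
      · rw [if_pos hpre] at hp
        simp only [List.length_singleton, List.drop_succ_cons, List.drop_zero] at hp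
        refine ih rest [] (cur.reverse :: acc) (by simp at hl ⊢; omega) (by simp) ?_ p hp
        intro q hq
        rcases List.mem_cons.mp hq with h1 | h2
        · subst h1; simpa using hcur
        · exact hacc q h2
      · rw [if_neg hpre] at hp
        have hcch : c ≠ ch := by
          intro he; subst he
          exact hpre (by simp [List.isPrefixOf])
        refine ih rest (ch :: cur) acc (by simp at hl ⊢; omega) ?_ hacc p hp
        intro hmem
        rcases List.mem_cons.mp hmem with h1 | h2
        · exact hcch h1
        · exact hcur h2

theorem splitOn_no_sep (c : Char) (s : List Char) : ∀ p ∈ PySem.Chars.splitOn s [c], c ∉ p := by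
  exact splitOn_go_no_sep c (s.length + 1) s [] [] (by omega) (by simp) (by simp)

theorem partition_value_no_sep (c sep : Char) : ∀ s : List Char, c ∉ s → c ∉ (pyPartitionChar s sep).2.2 := by
  intro s
  induction s with
  | nil => simp [pyPartitionChar]
  | cons x xs ih =>
    intro h
    simp only [List.mem_cons, not_or] at h
    by_cases hx : x = sep
    · simpa [pyPartitionChar, hx] using h.2
    · simpa [pyPartitionChar, hx] using ih h.2

-- on a value free of ';' the recursive call is exactly normVal (any positive fuel)
theorem normGo_no_semicolon (n : Nat) (value : String) (h : ';' ∉ value.toList) :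
    pyNormGo (n + 1) value = normVal value := by
  unfold pyNormGo normVal
  dsimp only
  by_cases h0 : (PySem.Str.strip value).toList = []
  · simp [h0]
  · rw [if_neg h0, if_neg h0]
    have hsemi : PySem.Str.isIn ";" (PySem.Str.strip value) = false := by
      show PySem.Chars.isIn ";".toList (PySem.Str.strip value).toList = false
      rw [PySem.Str.toList_strip]
      exact isIn_singleton_false (fun hm => h (mem_of_mem_strip hm))
    rw [hsemi]
    simp only [Bool.false_and, Bool.false_eq_true, if_false]

theorem foldl_congr_mem' {α β : Type} (l : List α) (f g : β → α → β)
    (h : ∀ b a, a ∈ l → f b a = g b a) : ∀ b, l.foldl f b = l.foldl g b := by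
  induction l with
  | nil => intro b; rfl
  | cons x xs ih =>
    intro b
    simp only [List.foldl_cons]
    rw [h b x (by simp)]
    exact ih (fun b a ha => h b a (by simp [ha])) _

theorem gStep_none (scheme : String) (a : Option String) (p : String) :
    gStep scheme a p = match gStep scheme none p with | some v => some v | none => a := by
  unfold gStep
  dsimp only
  split_ifs <;> simp

theorem gLast_acc (scheme : String) : ∀ (parts : List String) (a : Option String),
    parts.foldl (gStep scheme) a =
      match gLast parts scheme with | some v => some v | none => a := by
  intro parts
  induction parts with
  | nil => intro a; rfl
  | cons p ps ih =>
    intro a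
    simp only [List.foldl_cons, gLast] at *
    rw [ih (gStep scheme a p), ih (gStep scheme none p)]
    rcases hps : ps.foldl (gStep scheme) none with _ | w
    · simp only
      exact gStep_none scheme a p
    · simp

theorem aStep_get (scheme p : String) (d : PySem.Dict String String) :
    (aStep d p).get? scheme =
      match gStep scheme none p with | some v => some v | none => d.get? scheme := by
  unfold aStep gStep
  dsimp only
  by_cases h1 : (pyPartitionChar p.toList '=').2.1 = []
  · simp only [if_pos h1]
  · simp only [if_neg h1]
    by_cases h3 : (normVal (String.ofList (pyPartitionChar p.toList '=').2.2)).toList = []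
    · simp only [if_pos h3]
      by_cases h2 : PySem.Str.lower (PySem.Str.strip (String.ofList (pyPartitionChar p.toList '=').1)) ≠ scheme
      · simp only [if_pos h2]
      · simp only [if_neg h2]
    · simp only [if_neg h3]
      by_cases h2 : PySem.Str.lower (PySem.Str.strip (String.ofList (pyPartitionChar p.toList '=').1)) ≠ scheme
      · simp only [if_pos h2]
        exact PySem.Dict.get?_insert_of_ne d _ (Ne.symm h2)
      · simp only [if_neg h2]
        rw [not_not] at h2
        rw [h2]
        exact PySem.Dict.get?_insert_self d scheme _

theorem entries_get (scheme : String) : ∀ (parts : List String) (d : PySem.Dict String String),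
    (parts.foldl aStep d).get? scheme =
      match gLast parts scheme with | some v => some v | none => d.get? scheme := by
  intro parts
  induction parts with
  | nil => intro d; rfl
  | cons p ps ih =>
    intro d
    rw [List.foldl_cons, ih (aStep d p)]
    have hcons : gLast (p :: ps) scheme = ps.foldl (gStep scheme) (gStep scheme none p) := rfl
    rw [hcons, gLast_acc scheme ps (gStep scheme none p)]
    rcases hg : gLast ps scheme with _ | w
    · exact aStep_get scheme p d
    · rfl

-- B's inner-loop step, named for the proofs
def bStep (scheme best part : String) : String :=
  let r := pyPartitionChar part.toList '='
  if r.2.1 = [] then best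
  else if PySem.Str.lower (PySem.Str.strip (String.ofList r.1)) ≠ scheme then best
  else
    let v := PySem.Str.strip (String.ofList r.2.2)
    if v.toList = [] then best
    else if PySem.Str.isIn "://" v then v
    else String.ofList ("http://".toList ++ v.toList)

theorem altBest_foldl (parts : List String) (scheme : String) :
    altBest parts scheme = parts.foldl (bStep scheme) "" := rfl

theorem bStep_gStep (scheme acc p : String) :
    bStep scheme acc p = match gStep scheme none p with | some v => v | none => acc := by
  unfold bStep gStep normVal
  dsimp only
  by_cases h1 : (pyPartitionChar p.toList '=').2.1 = []
  · simp only [if_pos h1]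
  · simp only [if_neg h1]
    by_cases h2 : PySem.Str.lower (PySem.Str.strip (String.ofList (pyPartitionChar p.toList '=').1)) ≠ scheme
    · simp only [if_pos h2]
    · simp only [if_neg h2]
      by_cases h3 : (PySem.Str.strip (String.ofList (pyPartitionChar p.toList '=').2.2)).toList = []
      · simp only [if_pos h3]
        simp
      · simp only [if_neg h3]
        rcases hin : PySem.Str.isIn "://" (PySem.Str.strip (String.ofList (pyPartitionChar p.toList '=').2.2)) with _ | _
        · simp
        · have h3' : ¬ PySem.Chars.strip (pyPartitionChar p.toList '=').2.2 = [] := by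
            rw [← String.toList_ofList (l := (pyPartitionChar p.toList '=').2.2), ← PySem.Str.toList_strip]
            exact h3
          simp [h3']

theorem foldl_bStep_eq (scheme : String) : ∀ (parts : List String) (a : Option String) (acc : String),
    acc = (match a with | some v => v | none => "") →
    parts.foldl (bStep scheme) acc =
      match parts.foldl (gStep scheme) a with | some v => v | none => "" := by
  intro parts
  induction parts with
  | nil => intro a acc ha; simpa using ha
  | cons p ps ih =>
    intro a acc ha
    rw [List.foldl_cons, List.foldl_cons]
    apply ih
    rw [bStep_gStep scheme acc p, gStep_none scheme a p]
    rcases hg : gStep scheme none p with _ | u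
    · simpa using ha
    · rfl

theorem altBest_eq (scheme : String) : ∀ (parts : List String),
    altBest parts scheme = match gLast parts scheme with | some v => v | none => "" := by
  intro parts
  rw [altBest_foldl]
  exact foldl_bStep_eq scheme parts none "" rfl

set_option maxHeartbeats 1000000 in
theorem gStep_some_ne (scheme p w : String) (hw : gStep scheme none p = some w) :
    w.toList ≠ [] := by
  unfold gStep at hw
  dsimp only at hw
  by_cases h1 : (pyPartitionChar p.toList '=').2.1 = []
  · rw [if_pos h1] at hw; exact absurd hw (by simp)
  · rw [if_neg h1] at hw
    by_cases h2 : PySem.Str.lower (PySem.Str.strip (String.ofList (pyPartitionChar p.toList '=').1)) ≠ scheme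
    · rw [if_pos h2] at hw; exact absurd hw (by simp)
    · rw [if_neg h2] at hw
      by_cases h3 : (normVal (String.ofList (pyPartitionChar p.toList '=').2.2)).toList = []
      · rw [if_pos h3] at hw; exact absurd hw (by simp)
      · rw [if_neg h3] at hw
        exact (Option.some.inj hw) ▸ h3

theorem gLast_ne_nil (scheme : String) : ∀ (parts : List String) (a : Option String),
    (∀ w, a = some w → w.toList ≠ []) →
    ∀ v, parts.foldl (gStep scheme) a = some v → v.toList ≠ [] := by
  intro parts
  induction parts with
  | nil => intro a ha v hv; exact ha v hv
  | cons p ps ih =>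
    intro a ha v hv
    rw [List.foldl_cons] at hv
    refine ih (gStep scheme a p) ?_ v hv
    intro w hw
    rw [gStep_none scheme a p] at hw
    obtain hgn | ⟨u, hgu⟩ : gStep scheme none p = none ∨ ∃ u, gStep scheme none p = some u := by
      cases gStep scheme none p
      · exact Or.inl rfl
      · exact Or.inr ⟨_, rfl⟩
    · rw [hgn] at hw
      exact ha w hw
    · rw [hgu] at hw
      exact (Option.some.inj hw) ▸ gStep_some_ne scheme p u hgu

theorem pref_eq (entries : PySem.Dict String String) (parts : List String)
    (h : ∀ k, entries.get? k = gLast parts k) :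
    ∀ keys, pyPrefLoop entries keys = altSchemes parts keys := by
  intro keys
  induction keys with
  | nil => rfl
  | cons k ks ih =>
    unfold pyPrefLoop altSchemes
    rw [h k, altBest_eq k parts]
    rcases hg : gLast parts k with _ | v
    · simpa using ih
    · have hv : v.toList ≠ [] := gLast_ne_nil k parts none (by simp) v hg
      simp [hv]

theorem dict_branch_eq (token : String) (m : Nat)
    (hparts : ∀ p ∈ (PySem.Str.split? token ";").getD [], ';' ∉ p.toList) :
    pyPrefLoop (((PySem.Str.split? token ";").getD []).foldl
        (fun (d : PySem.Dict String String) part =>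
          let r := pyPartitionChar part.toList '='
          if r.2.1 = [] then d
          else
            let key := PySem.Str.lower (PySem.Str.strip (String.ofList r.1))
            let normalized := pyNormGo (m + 1) (String.ofList r.2.2)
            if normalized.toList = [] then d else d.insert key normalized) PySem.Dict.empty)
      ["https", "http", "socks", "socks5"]
    = altSchemes ((PySem.Str.split? token ";").getD []) ["https", "http", "socks", "socks5"] := by
  have hstep : ∀ (d : PySem.Dict String String) (part : String),
      part ∈ (PySem.Str.split? token ";").getD [] →
      (fun (d : PySem.Dict String String) part =>
        let r := pyPartitionChar part.toList '='
        if r.2.1 = [] then d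
        else
          let key := PySem.Str.lower (PySem.Str.strip (String.ofList r.1))
          let normalized := pyNormGo (m + 1) (String.ofList r.2.2)
          if normalized.toList = [] then d else d.insert key normalized) d part = aStep d part := by
    intro d part hmem
    have hv : ';' ∉ (String.ofList (pyPartitionChar part.toList '=').2.2).toList := by
      rw [String.toList_ofList]
      exact partition_value_no_sep ';' '=' part.toList (hparts part hmem)
    dsimp only
    unfold aStep
    dsimp only
    rw [normGo_no_semicolon m _ hv]
  rw [foldl_congr_mem' _ _ aStep hstep PySem.Dict.empty]
  have hget : ∀ k, (((PySem.Str.split? token ";").getD []).foldl aStep PySem.Dict.empty).get? k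
      = gLast ((PySem.Str.split? token ";").getD []) k := by
    intro k
    rw [entries_get k _ PySem.Dict.empty]
    rcases gLast ((PySem.Str.split? token ";").getD []) k with _ | v
    · simp [PySem.Dict.get?_empty]
    · rfl
  exact pref_eq _ _ hget _

-- ===== VERDICT (by name: the statement is the Claim_ definition above) =====
theorem normalize_proxy_url_py_spec : Claim_equal_normalize_proxy_url_py := by
  unfold Claim_equal_normalize_proxy_url_py
  intro raw _
  unfold Spec_normalize_proxy_url_py normalize_proxy_url_py normalize_proxy_url_py_alt
  rw [pyNormGo]
  dsimp only
  by_cases h0 : (PySem.Str.strip raw).toList = []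
  · rw [if_pos h0, if_pos h0]
  · rw [if_neg h0, if_neg h0]
    by_cases hb : (PySem.Str.isIn ";" (PySem.Str.strip raw) && PySem.Str.isIn "=" (PySem.Str.strip raw)) = true
    · rw [if_pos hb, if_pos hb]
      have hraw : raw.toList ≠ [] := by
        intro he
        apply h0
        rw [PySem.Str.toList_strip, he]
        rfl
      obtain ⟨m, hm⟩ : ∃ m, raw.toList.length = m + 1 := by
        cases hL : raw.toList.length with
        | zero => exact absurd (List.length_eq_zero_iff.mp hL) hraw
        | succ m => exact ⟨m, rfl⟩
      rw [hm]
      have hparts : ∀ p ∈ (PySem.Str.split? (PySem.Str.strip raw) ";").getD [], ';' ∉ p.toList := by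
        intro p hp
        have hts : (";" : String).toList = [';'] := rfl
        have hsp : (PySem.Str.split? (PySem.Str.strip raw) ";").getD []
            = (PySem.Chars.splitOn (PySem.Str.strip raw).toList [';']).map String.ofList := by
          simp [PySem.Str.split?, PySem.Chars.split?, hts]
        rw [hsp] at hp
        obtain ⟨q, hq, rfl⟩ := List.mem_map.mp hp
        rw [String.toList_ofList]
        exact splitOn_no_sep ';' _ q hq
      exact dict_branch_eq (PySem.Str.strip raw) m hparts
    · rw [if_neg hb, if_neg hb]
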